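-- pv_equiv track=rewrite | github.com/FroeMic/FullStack_Info_FinalProject | app/utils/rating_to_stars.py | rating_to_stars
-- ===== SOURCE A (Python) =====
-- EMPTY_STAR = '☆'
--
-- FULL_STAR = '★'
--
-- def rating_to_stars(rating, max=5):
--     ''' Turn a rating into an array of stars, e.g. ['★', '★', '★' , '☆', '☆'] '''
--     result = []
--     for i in range(1, max+1):
--         if rating > i:
--             result.append(FULL_STAR)
--         else:
--             result.append(EMPTY_STAR)
--     return result
-- ===== SOURCE B (Python) =====
-- EMPTY_STAR = '☆'
--
-- FULL_STAR = '★'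
--
-- def rating_to_stars(rating, max=5):
--     ''' Turn a rating into an array of stars, e.g. ['★', '★', '★' , '☆', '☆'] '''
--     n = rating - 1
--     if n < 0:
--         n = 0
--     if n > max:
--         n = max
--     return [FULL_STAR] * n + [EMPTY_STAR] * (max - n)
-- ===== Notes on version B (the rewrite author's own statement) =====
-- stated objective: simpler
-- what changed: Replaces the per-position loop with a closed-form count of full stars (rating-1 clamped to [0,max]) and builds the list from two replications.
import Mathlib
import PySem

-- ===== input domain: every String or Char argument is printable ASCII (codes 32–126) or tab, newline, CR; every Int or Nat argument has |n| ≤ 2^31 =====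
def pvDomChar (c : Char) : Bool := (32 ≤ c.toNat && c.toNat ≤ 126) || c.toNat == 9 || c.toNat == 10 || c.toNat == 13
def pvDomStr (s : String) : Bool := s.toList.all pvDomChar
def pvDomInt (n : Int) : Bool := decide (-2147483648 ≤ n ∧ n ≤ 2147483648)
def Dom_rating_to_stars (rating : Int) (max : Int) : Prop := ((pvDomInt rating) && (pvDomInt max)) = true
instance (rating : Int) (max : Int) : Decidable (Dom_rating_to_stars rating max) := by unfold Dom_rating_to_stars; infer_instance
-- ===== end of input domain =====

-- B replaces A's per-position loop by a closed-form full-star count (rating-1 clamped to [0,max]) and two replications; objective: simpler.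

-- ===== PORT A =====
def rating_to_stars (rating : Int) (max : Int) : List String :=
  (PySem.List.pyRange 1 (max + 1) 1).foldl
    (fun result i => result ++ [if rating > i then "★" else "☆"]) []

-- ===== PORT B =====
def rating_to_stars_alt (rating : Int) (max : Int) : List String :=
  let n := rating - 1
  let n := if n < 0 then 0 else n
  let n := if n > max then max else n
  List.replicate n.toNat "★" ++ List.replicate (max - n).toNat "☆"

-- ===== PRECONDITION & SPEC =====
def Spec_rating_to_stars (rating : Int) (max : Int) (out : List String) : Prop := out = rating_to_stars_alt rating max
instance (rating : Int) (max : Int) (out : List String) : Decidable (Spec_rating_to_stars rating max out) := by unfold Spec_rating_to_stars; infer_instance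

-- ===== CLAIM (what is proved, stated in full; the proofs are below) =====
def Claim_equal_rating_to_stars : Prop := ∀ (rating : Int) (max : Int), Dom_rating_to_stars rating max → Spec_rating_to_stars rating max (rating_to_stars rating max)

-- ===== LEMMAS AND PROOFS =====

lemma a_eq_alt (rating max : Int) : rating_to_stars rating max = rating_to_stars_alt rating max := by
  unfold rating_to_stars rating_to_stars_alt
  rw [PySem.List.foldl_append_singleton_eq_map, PySem.List.pyRange_one]
  simp only [List.nil_append, List.map_map]
  set n1 : Int := if rating - 1 < 0 then 0 else rating - 1 with hn1
  set n : Int := if n1 > max then max else n1 with hn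
  have key : ∀ k : ℕ, (k : Int) < max → (rating > 1 + (k : Int) ↔ k < n.toNat) := by
    intro k hk
    rw [hn, hn1]
    split_ifs <;> omega
  apply List.ext_getElem
  · simp only [List.length_map, List.length_range, List.length_append, List.length_replicate]
    rw [hn, hn1]; split_ifs <;> omega
  · intro k h1 h2
    simp only [List.getElem_map, List.getElem_range, Function.comp_apply]
    simp only [List.length_map, List.length_range] at h1
    have hk : (k : Int) < max := by omega
    by_cases hlt : k < n.toNat
    · rw [List.getElem_append_left (by simpa using hlt), List.getElem_replicate,
        if_pos ((key k hk).mpr hlt)]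
    · rw [List.getElem_append_right (by simpa using hlt), List.getElem_replicate,
        if_neg (fun h => hlt ((key k hk).mp h))]

-- ===== VERDICT (by name: the statement is the Claim_ definition above) =====
theorem rating_to_stars_spec : Claim_equal_rating_to_stars := by
  intro rating max _
  exact a_eq_alt rating max
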